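-- pv_equiv track=rewrite | github.com/JaneChun/algorithm | 프로그래머스/1/138477. 명예의 전당 （1）/명예의 전당 （1）.py | solution
-- ===== SOURCE A (Python) =====
-- def solution(k, score):
--     answer = []
--
--     hallOfFame = []
--     for s in score:
--         if len(hallOfFame) < k:
--             hallOfFame.append(s) # [10, 100, 20]
--         elif s > hallOfFame[-1]:
--             hallOfFame.pop()
--             hallOfFame.append(s)
--         hallOfFame.sort(reverse=True)
--         answer.append(hallOfFame[-1])
--
--     return answer
-- ===== SOURCE B (Python) =====
-- def solution(k, score):
--     # One growing ascending list, maintained by binary-search insertion (no sort calls);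
--     # the running k-th best is read directly by index.
--     answer = []
--     seen = []  # ascending order
--     for s in score:
--         lo, hi = 0, len(seen)
--         while lo < hi:
--             mid = (lo + hi) // 2
--             if seen[mid] < s:
--                 lo = mid + 1
--             else:
--                 hi = mid
--         seen.insert(lo, s)
--         answer.append(seen[max(len(seen) - k, 0)])
--     return answer
-- ===== Notes on version B (the rewrite author's own statement) =====
-- stated objective: alternative
-- what changed: B drops A's bounded k-element hall-of-fame with its two branches, pop and per-step re-sort; it keeps one growing ascending list maintained by a hand-written binary-search insertion (no sort calls) and reads the running k-th best directly as seen[max(len(seen) - k, 0)].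
import Mathlib
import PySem

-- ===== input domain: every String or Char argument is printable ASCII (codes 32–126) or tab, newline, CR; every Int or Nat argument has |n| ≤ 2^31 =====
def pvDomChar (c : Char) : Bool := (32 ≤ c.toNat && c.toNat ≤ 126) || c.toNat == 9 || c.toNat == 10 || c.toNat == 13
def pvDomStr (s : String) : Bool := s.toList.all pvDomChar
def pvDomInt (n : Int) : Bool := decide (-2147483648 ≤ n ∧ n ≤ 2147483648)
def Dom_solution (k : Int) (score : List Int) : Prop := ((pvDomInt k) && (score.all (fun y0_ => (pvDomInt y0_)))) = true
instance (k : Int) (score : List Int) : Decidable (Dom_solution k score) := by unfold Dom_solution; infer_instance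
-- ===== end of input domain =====

-- B replaces A's bounded k-list (two branches, pop, re-sort every step) by binary-search
-- insertion into one growing ascending list read at index max(len-k, 0) (objective: alternative;
-- a timing run measured B faster on its generated large inputs).

-- ===== PORT A =====
-- loop body of A, one step per score s; pop()+append(s) on the nonempty list is dropLast ++ [s]
def stepA (k : Int) (st : List Int × List Int) (s : Int) : List Int × List Int :=
  let answer := st.1
  let hallOfFame := st.2
  let hallOfFame :=
    if (hallOfFame.length : Int) < k then hallOfFame ++ [s]
    else if s > (PySem.List.pyGet? hallOfFame (-1)).getD 0 then
      -- hallOfFame.pop(); hallOfFame.append(s) — exact under Pre_ (hallOfFame nonempty here)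
      hallOfFame.dropLast ++ [s]
    else hallOfFame
  let hallOfFame := PySem.List.sorted hallOfFame (fun x => x) true
  (answer ++ [(PySem.List.pyGet? hallOfFame (-1)).getD 0], hallOfFame)

def solution (k : Int) (score : List Int) : List Int :=
  (score.foldl (stepA k) ([], [])).1

-- ===== PORT B =====
-- the while loop of Source B: lo, hi = 0, len(seen); while lo < hi: … — the state is (lo, hi);
-- mid < hi ≤ len(seen) throughout, so seen[mid] is exact (.getD is never reached out of range)
def bsearch (seen : List Int) (s : Int) (lo hi : Nat) : Nat :=
  if lo < hi then
    let mid := (lo + hi) / 2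
    if (PySem.List.pyGet? seen ((mid : Nat) : Int)).getD 0 < s then bsearch seen s (mid + 1) hi
    else bsearch seen s lo mid
  else lo
termination_by hi - lo
decreasing_by all_goals omega

-- loop body of B: seen.insert(lo, s); answer.append(seen[max(len(seen) - k, 0)])
def stepB (k : Int) (st : List Int × List Int) (s : Int) : List Int × List Int :=
  let answer := st.1
  let seen := PySem.List.insert st.2 ((bsearch st.2 s 0 st.2.length : Nat) : Int) s
  (answer ++ [(PySem.List.pyGet? seen (max ((seen.length : Int) - k) 0)).getD 0], seen)

def solution_alt (k : Int) (score : List Int) : List Int :=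
  (score.foldl (stepB k) ([], [])).1

-- ===== PRECONDITION & SPEC =====
-- Pre_ excludes only k ≤ 0 with a non-empty score, where A raises IndexError (hallOfFame[-1] on []).
def Pre_solution (k : Int) (score : List Int) : Prop := 1 ≤ k ∨ score = []
instance (k : Int) (score : List Int) : Decidable (Pre_solution k score) := by unfold Pre_solution; infer_instance
def pvWitness_solution : Int × List Int := (3, [10, 100, 20, 150, 1, 100, 200])

def Spec_solution (k : Int) (score : List Int) (out : List Int) : Prop := out = solution_alt k score
instance (k : Int) (score : List Int) (out : List Int) : Decidable (Spec_solution k score out) := by unfold Spec_solution; infer_instance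

-- ===== CLAIM (what is proved, stated in full; the proofs are below) =====
def Claim_equal_solution : Prop := ∀ (k : Int) (score : List Int), Dom_solution k score → Pre_solution k score → Spec_solution k score (solution k score)

-- ===== LEMMAS AND PROOFS =====

-- insertion of s into a descending-sorted list, after all elements ≥ s
def insDesc (s : Int) : List Int → List Int
  | [] => [s]
  | a :: t => if s ≤ a then a :: insDesc s t else s :: a :: t

lemma insDesc_perm (s : Int) (l : List Int) : (insDesc s l).Perm (l ++ [s]) := by
  induction l with
  | nil => simp [insDesc]
  | cons a t ih =>
    by_cases h : s ≤ a
    · simpa [insDesc, h] using ih.cons a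
    · rw [insDesc, if_neg h]
      exact (List.perm_append_singleton s (a :: t)).symm

lemma insDesc_length (s : Int) (l : List Int) : (insDesc s l).length = l.length + 1 :=
  ((insDesc_perm s l).length_eq).trans (by simp)

lemma insDesc_ne_nil (s : Int) (l : List Int) : insDesc s l ≠ [] := by
  intro h
  have := insDesc_length s l
  rw [h] at this
  simp at this

lemma mem_insDesc {x s : Int} {l : List Int} : x ∈ insDesc s l ↔ x = s ∨ x ∈ l := by
  rw [(insDesc_perm s l).mem_iff]
  simp [or_comm]

lemma insDesc_pairwise (s : Int) (l : List Int)
    (h : l.Pairwise (fun a b : Int => b ≤ a)) :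
    (insDesc s l).Pairwise (fun a b : Int => b ≤ a) := by
  induction l with
  | nil => simp [insDesc]
  | cons a t ih =>
    rcases List.pairwise_cons.mp h with ⟨ha, ht⟩
    by_cases hs : s ≤ a
    · rw [insDesc, if_pos hs]
      refine List.pairwise_cons.mpr ⟨?_, ih ht⟩
      intro x hx
      rcases mem_insDesc.mp hx with rfl | hx
      · exact hs
      · exact ha x hx
    · rw [insDesc, if_neg hs]
      refine List.pairwise_cons.mpr ⟨?_, h⟩
      intro x hx
      rcases List.mem_cons.mp hx with rfl | hx
      · omega
      · exact le_trans (ha x hx) (by omega)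

-- any descending rearrangement of xs IS sorted(xs, reverse=True)
lemma sortDesc_eq {xs ys : List Int} (hp : ys.Perm xs)
    (hs : ys.Pairwise (fun a b : Int => b ≤ a)) :
    PySem.List.sorted xs (fun x => x) true = ys := by
  refine PySem.List.eq_of_perm_of_pairwise_le_of_injective (fun x : Int => -x)
    (fun a b h => by simpa using neg_injective h)
    ((PySem.List.sorted_perm xs (fun x => x) true).trans hp.symm) ?_ ?_
  · exact (PySem.List.sorted_pairwise_rev xs (fun x => x)).imp (by intro a b h; simpa using h)
  · exact hs.imp (by intro a b h; simpa using h)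

lemma sd_append (s : Int) (l : List Int) (h : l.Pairwise (fun a b : Int => b ≤ a)) :
    PySem.List.sorted (l ++ [s]) (fun x => x) true = insDesc s l :=
  sortDesc_eq (insDesc_perm s l) (insDesc_pairwise s l h)

lemma pairwise_take {l : List Int} (n : Nat) (h : l.Pairwise (fun a b : Int => b ≤ a)) :
    (l.take n).Pairwise (fun a b : Int => b ≤ a) :=
  h.sublist (List.take_sublist n l)

lemma getD_mem {l : List Int} {i : Nat} (h : i < l.length) : l.getD i 0 ∈ l := by
  rw [List.getD_eq_getElem l 0 h]
  exact List.getElem_mem h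

lemma insDesc_take_le (s : Int) :
    ∀ (l : List Int) (K : Nat), 0 < K → K ≤ l.length →
      l.Pairwise (fun a b : Int => b ≤ a) → s ≤ l.getD (K - 1) 0 →
      (insDesc s l).take K = l.take K := by
  intro l
  induction l with
  | nil => intro K h1 h2 _ _; simp at h2; omega
  | cons a t ih =>
    intro K hK hKl hp hle
    rcases List.pairwise_cons.mp hp with ⟨ha, ht⟩
    rcases Nat.exists_eq_add_of_lt hK with ⟨m, rfl⟩
    simp only [Nat.zero_add] at *
    by_cases hm : m = 0
    · subst hm
      have hsa : s ≤ a := by simpa using hle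
      simp [insDesc, hsa]
    · have hmt : m - 1 < t.length := by simp at hKl; omega
      have hgd : (a :: t).getD (m + 1 - 1) 0 = t.getD (m - 1) 0 := by
        have : m + 1 - 1 = m := by omega
        rw [this]
        have : m = (m - 1) + 1 := by omega
        rw [this]
        simp
      rw [hgd] at hle
      have hsa : s ≤ a := le_trans hle (ha _ (getD_mem hmt))
      rw [insDesc, if_pos hsa]
      simp only [List.take_succ_cons]
      rw [ih m (by omega) (by simp at hKl; omega) ht hle]

lemma insDesc_take_gt (s : Int) :
    ∀ (l : List Int) (K : Nat), 0 < K → K ≤ l.length →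
      l.Pairwise (fun a b : Int => b ≤ a) → l.getD (K - 1) 0 < s →
      (insDesc s l).take K = insDesc s (l.take (K - 1)) := by
  intro l
  induction l with
  | nil => intro K h1 h2 _ _; simp at h2; omega
  | cons a t ih =>
    intro K hK hKl hp hgt
    rcases List.pairwise_cons.mp hp with ⟨ha, ht⟩
    rcases Nat.exists_eq_add_of_lt hK with ⟨m, rfl⟩
    simp only [Nat.zero_add] at *
    by_cases hsa : s ≤ a
    · have hm : m ≠ 0 := by
        intro h; subst h; simp at hgt; omega
      have hgd : (a :: t).getD (m + 1 - 1) 0 = t.getD (m - 1) 0 := by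
        have h1 : m + 1 - 1 = m := by omega
        rw [h1]
        have h2 : m = (m - 1) + 1 := by omega
        rw [h2]
        simp
      rw [hgd] at hgt
      rw [insDesc, if_pos hsa]
      simp only [List.take_succ_cons]
      have htk : (a :: t).take (m + 1 - 1) = a :: t.take (m - 1) := by
        have h1 : m + 1 - 1 = m := by omega
        rw [h1]
        have h2 : m = (m - 1) + 1 := by omega
        rw [h2]
        simp
      rw [htk, insDesc, if_pos hsa]
      rw [ih m (by omega) (by simp at hKl; omega) ht hgt]
    · rw [insDesc, if_neg hsa]
      by_cases hm : m = 0
      · subst hm; simp [insDesc]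
      · have htk : (a :: t).take (m + 1 - 1) = a :: t.take (m - 1) := by
          have h1 : m + 1 - 1 = m := by omega
          rw [h1]
          have h2 : m = (m - 1) + 1 := by omega
          rw [h2]
          simp
        rw [htk, insDesc, if_neg hsa]
        simp only [List.take_succ_cons]
        have h2 : m = (m - 1) + 1 := by omega
        rw [h2]
        simp

-- last element of a nonempty list via Python's [-1]
lemma pyGet_neg_one {l : List Int} (h : l ≠ []) :
    PySem.List.pyGet? l (-1) = l[l.length - 1]? := by
  have hl : 1 ≤ l.length := List.length_pos_iff.mpr h
  simp [PySem.List.pyGet?, PySem.List.pyIdx?, hl]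

lemma pyGet_take_neg_one {l : List Int} {K : Nat} (h0 : 0 < K) (hne : l ≠ []) :
    PySem.List.pyGet? (l.take K) (-1) = l[min K l.length - 1]? := by
  have hl : 0 < l.length := List.length_pos_iff.mpr hne
  have hne' : l.take K ≠ [] := by
    simp only [ne_eq, List.take_eq_nil_iff]
    push_neg
    constructor <;> [omega; exact hne]
  rw [pyGet_neg_one hne']
  have hlen : (l.take K).length = min K l.length := by simp
  rw [hlen]
  have hidx : min K l.length - 1 < K := by omega
  rw [List.getElem?_take_of_lt hidx]

-- position at which linear left-to-right insertion would place s (proof-side spec of bsearch)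
def scanPos (s : Int) : List Int → Nat
  | [] => 0
  | a :: t => if a < s then scanPos s t + 1 else 0

lemma scanPos_le (s : Int) (l : List Int) : scanPos s l ≤ l.length := by
  induction l with
  | nil => simp [scanPos]
  | cons a t ih => by_cases h : a < s <;> simp [scanPos, h] <;> omega

-- ordered insertion into an ascending list
def insAsc (s : Int) : List Int → List Int
  | [] => [s]
  | a :: t => if a < s then a :: insAsc s t else s :: a :: t

lemma insert_scanPos_eq (s : Int) (l : List Int) :
    PySem.List.insert l ((scanPos s l : Nat) : Int) s = insAsc s l := by
  induction l with
  | nil => simp [scanPos, insAsc, PySem.List.insert_zero]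
  | cons a t ih =>
    by_cases h : a < s
    · rw [scanPos, if_pos h, insAsc, if_pos h]
      rw [PySem.List.insert_natCast _ _ _ (by simpa [scanPos, h] using Nat.succ_le_succ (scanPos_le s t))]
      rw [← ih, PySem.List.insert_natCast _ _ _ (scanPos_le s t)]
      simp
    · rw [scanPos, if_neg h, insAsc, if_neg h]
      simpa using PySem.List.insert_zero (a :: t) s

-- getD monotonicity on an ascending list
lemma getD_mono {l : List Int} (h : l.Pairwise (fun a b : Int => a ≤ b))
    {i j : Nat} (hij : i ≤ j) (hj : j < l.length) : l.getD i 0 ≤ l.getD j 0 := by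
  rw [List.getD_eq_getElem l 0 (by omega), List.getD_eq_getElem l 0 hj]
  rcases Nat.eq_or_lt_of_le hij with rfl | hlt
  · exact le_rfl
  · exact List.pairwise_iff_getElem.mp h i j (by omega) hj hlt

-- invariant of the binary-search loop: elements left of lo are < s, elements from hi on are ≥ s
lemma bsearch_invariant (l : List Int) (s : Int)
    (hsort : l.Pairwise (fun a b : Int => a ≤ b)) :
    ∀ (n lo hi : Nat), hi - lo = n → lo ≤ hi → hi ≤ l.length →
      (∀ j, j < lo → l.getD j 0 < s) →
      (∀ j, hi ≤ j → j < l.length → s ≤ l.getD j 0) →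
      (∀ j, j < bsearch l s lo hi → l.getD j 0 < s) ∧
      (∀ j, bsearch l s lo hi ≤ j → j < l.length → s ≤ l.getD j 0) ∧
      bsearch l s lo hi ≤ l.length := by
  intro n
  induction n using Nat.strong_induction_on with
  | _ n ih =>
    intro lo hi hn hlh hhl hlo hhi
    by_cases h : lo < hi
    · rw [bsearch, if_pos h]
      have hmid : (lo + hi) / 2 < l.length := by omega
      have hget : (PySem.List.pyGet? l (((lo + hi) / 2 : Nat) : Int)).getD 0
          = l.getD ((lo + hi) / 2) 0 := by
        rw [PySem.List.pyGet?_natCast, List.getElem?_eq_getElem hmid,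
          List.getD_eq_getElem l 0 hmid]
        rfl
      simp only [hget]
      by_cases hc : l.getD ((lo + hi) / 2) 0 < s
      · rw [if_pos hc]
        refine ih (hi - ((lo + hi) / 2 + 1)) (by omega) _ _ rfl (by omega) hhl ?_ hhi
        intro j hj
        exact lt_of_le_of_lt (getD_mono hsort (by omega) hmid) hc
      · rw [if_neg hc]
        refine ih ((lo + hi) / 2 - lo) (by omega) _ _ rfl (by omega) (by omega) hlo ?_
        intro j hj hjl
        exact le_trans (by omega) (getD_mono hsort hj hjl)
    · rw [bsearch, if_neg h]
      have : lo = hi := by omega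
      subst this
      exact ⟨hlo, hhi, by omega⟩

-- on an ascending list the binary search finds exactly the linear-scan position
lemma scanPos_char (s : Int) :
    ∀ (l : List Int) (r : Nat), r ≤ l.length →
      (∀ j, j < r → l.getD j 0 < s) →
      (∀ j, r ≤ j → j < l.length → s ≤ l.getD j 0) →
      scanPos s l = r := by
  intro l
  induction l with
  | nil => intro r hr _ _; simp at hr; simp [scanPos, hr]
  | cons a t ih =>
    intro r hr hlt hge
    cases r with
    | zero =>
      have ha : s ≤ a := by simpa using hge 0 (by omega) (by simp)
      rw [scanPos, if_neg (by omega)]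
    | succ m =>
      have ha : a < s := by simpa using hlt 0 (by omega)
      rw [scanPos, if_pos ha]
      rw [ih m (by simpa using hr) (fun j hj => by simpa using hlt (j + 1) (by omega))
        (fun j hj hjl => by simpa using hge (j + 1) (by omega) (by simpa using hjl))]

lemma bsearch_eq_scanPos (l : List Int) (s : Int)
    (h : l.Pairwise (fun a b : Int => a ≤ b)) :
    bsearch l s 0 l.length = scanPos s l := by
  obtain ⟨h1, h2, h3⟩ := bsearch_invariant l s h l.length 0 l.length rfl (by omega) le_rfl
    (by omega) (by omega)
  exact (scanPos_char s l _ h3 h1 h2).symm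

lemma insAsc_perm (s : Int) (l : List Int) : (insAsc s l).Perm (l ++ [s]) := by
  induction l with
  | nil => simp [insAsc]
  | cons a t ih =>
    by_cases h : a < s
    · simpa [insAsc, h] using ih.cons a
    · rw [insAsc, if_neg h]
      exact (List.perm_append_singleton s (a :: t)).symm

lemma mem_insAsc {x s : Int} {l : List Int} : x ∈ insAsc s l ↔ x = s ∨ x ∈ l := by
  rw [(insAsc_perm s l).mem_iff]
  simp [or_comm]

lemma insAsc_pairwise (s : Int) (l : List Int)
    (h : l.Pairwise (fun a b : Int => a ≤ b)) :
    (insAsc s l).Pairwise (fun a b : Int => a ≤ b) := by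
  induction l with
  | nil => simp [insAsc]
  | cons a t ih =>
    rcases List.pairwise_cons.mp h with ⟨ha, ht⟩
    by_cases hs : a < s
    · rw [insAsc, if_pos hs]
      refine List.pairwise_cons.mpr ⟨?_, ih ht⟩
      intro x hx
      rcases mem_insAsc.mp hx with rfl | hx
      · omega
      · exact ha x hx
    · rw [insAsc, if_neg hs]
      refine List.pairwise_cons.mpr ⟨?_, h⟩
      intro x hx
      rcases List.mem_cons.mp hx with rfl | hx
      · omega
      · exact le_trans (by omega : s ≤ a) (ha x hx)

-- ascending insertion into the reverse of a descending list = reverse of descending insertion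
lemma insAsc_reverse (s : Int) (l : List Int)
    (h : l.Pairwise (fun a b : Int => b ≤ a)) :
    insAsc s l.reverse = (insDesc s l).reverse := by
  have hrev : l.reverse.Pairwise (fun a b : Int => a ≤ b) := by
    rw [List.pairwise_reverse]; exact h
  refine List.Perm.eq_of_pairwise' (r := fun a b : Int => a ≤ b)
    (insAsc_pairwise s l.reverse hrev) ?_ ?_
  · rw [List.pairwise_reverse]
    exact (insDesc_pairwise s l h).imp (fun {a b} hab => hab)
  · refine (insAsc_perm s l.reverse).trans ?_
    have : (insDesc s l).reverse.Perm (insDesc s l) := List.reverse_perm _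
    refine List.Perm.trans ?_ this.symm
    refine List.Perm.trans ?_ (insDesc_perm s l).symm
    exact List.Perm.append_right [s] (List.reverse_perm l)

-- reading an ascending prefix at max(len-k, 0) = reading the descending prefix at min(k,len)-1
lemma rev_idx_eq (d : List Int) (k : Int) (K : Nat) (hk : k = (K : Int)) (hK : 0 < K)
    (hd : d ≠ []) :
    PySem.List.pyGet? d.reverse (max ((d.reverse.length : Int) - k) 0)
      = d[min K d.length - 1]? := by
  have hL : 0 < d.length := List.length_pos_iff.mpr hd
  subst hk
  have hcast : max ((d.reverse.length : Int) - (K : Int)) 0 = ((d.length - K : Nat) : Int) := by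
    simp only [List.length_reverse]; omega
  rw [hcast, PySem.List.pyGet?_natCast]
  have hlt : d.length - K < d.length := by omega
  rw [List.getElem?_reverse hlt]
  congr 1
  omega

-- one synchronised step: A's hall of fame is the K-prefix, B's seen the reverse, of the
-- descending-sorted prefix
lemma step_sync (k : Int) (K : Nat) (hk : k = (K : Int)) (hK : 0 < K)
    (ans : List Int) (l : List Int) (hl : l.Pairwise (fun a b : Int => b ≤ a)) (s : Int) :
    stepA k (ans, l.take K) s
      = (ans ++ [((insDesc s l)[min K (l.length + 1) - 1]?).getD 0], (insDesc s l).take K)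
    ∧ stepB k (ans, l.reverse) s
      = (ans ++ [((insDesc s l)[min K (l.length + 1) - 1]?).getD 0], (insDesc s l).reverse) := by
  have hlen' : (insDesc s l).length = l.length + 1 := insDesc_length s l
  have hne' : insDesc s l ≠ [] := insDesc_ne_nil s l
  have hB : stepB k (ans, l.reverse) s
      = (ans ++ [((insDesc s l)[min K (l.length + 1) - 1]?).getD 0], (insDesc s l).reverse) := by
    have hrev : l.reverse.Pairwise (fun a b : Int => a ≤ b) := by
      rw [List.pairwise_reverse]; exact hl
    simp only [stepB, bsearch_eq_scanPos _ _ hrev, insert_scanPos_eq, insAsc_reverse s l hl]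
    rw [rev_idx_eq _ k K hk hK hne', hlen']
  refine ⟨?_, hB⟩
  -- A's side: show the post-sort hall of fame is (insDesc s l).take K
  have hhof : PySem.List.sorted
      (if ((l.take K).length : Int) < k then l.take K ++ [s]
       else if s > (PySem.List.pyGet? (l.take K) (-1)).getD 0 then (l.take K).dropLast ++ [s]
       else l.take K) (fun x => x) true = (insDesc s l).take K := by
    by_cases hlt : l.length < K
    · have hcond : ((l.take K).length : Int) < k := by
        subst hk; simp; omega
      rw [if_pos hcond]
      have htake : l.take K = l := List.take_of_length_le (by omega)
      simp only [htake, sd_append s l hl]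
      exact (List.take_of_length_le (by omega)).symm
    · push_neg at hlt
      have hcond : ¬ ((l.take K).length : Int) < k := by
        subst hk; simp; omega
      rw [if_neg hcond]
      have hlne : l ≠ [] := by
        intro h; subst h; simp at hlt; omega
      have hlast : (PySem.List.pyGet? (l.take K) (-1)).getD 0 = l.getD (K - 1) 0 := by
        rw [pyGet_take_neg_one hK hlne]
        have hmin : min K l.length = K := by omega
        rw [hmin]
        have hK1 : K - 1 < l.length := by omega
        rw [List.getElem?_eq_getElem hK1, List.getD_eq_getElem l 0 hK1]
        rfl
      rw [hlast]
      by_cases hgt : l.getD (K - 1) 0 < s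
      · rw [if_pos hgt]
        have hdrop : (l.take K).dropLast = l.take (K - 1) := by
          rw [List.dropLast_eq_take]
          rw [List.take_take]
          congr 1
          simp
          omega
        rw [hdrop, sd_append s (l.take (K - 1)) (pairwise_take _ hl)]
        exact (insDesc_take_gt s l K hK hlt hl hgt).symm
      · rw [if_neg hgt]
        push_neg at hgt
        have hst : PySem.List.sorted (l.take K) (fun x => x) true = l.take K :=
          PySem.List.sorted_rev_eq_self_of_pairwise _ _ (pairwise_take _ hl)
        rw [hst]
        exact (insDesc_take_le s l K hK hlt hl hgt).symm
  have hval : (PySem.List.pyGet? ((insDesc s l).take K) (-1)).getD 0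
      = ((insDesc s l)[min K (l.length + 1) - 1]?).getD 0 := by
    rw [pyGet_take_neg_one hK hne', hlen']
  simp only [stepA]
  rw [hhof, hval]

lemma loop_eq (k : Int) (K : Nat) (hk : k = (K : Int)) (hK : 0 < K) :
    ∀ (p : List Int) (ans : List Int) (l : List Int),
      l.Pairwise (fun a b : Int => b ≤ a) →
      (p.foldl (stepA k) (ans, l.take K)).1 = (p.foldl (stepB k) (ans, l.reverse)).1 := by
  intro p
  induction p with
  | nil => intro ans l _; rfl
  | cons s p ih =>
    intro ans l hl
    obtain ⟨hA, hB⟩ := step_sync k K hk hK ans l hl s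
    simp only [List.foldl_cons, hA, hB]
    exact ih _ (insDesc s l) (insDesc_pairwise s l hl)

-- ===== VERDICT (by name: the statement is the Claim_ definition above) =====
theorem solution_spec : Claim_equal_solution := by
  intro k score _ hpre
  unfold Spec_solution
  rcases hpre with hk | hnil
  · have hK : 0 < k.toNat := by omega
    have hkk : k = (k.toNat : Int) := by omega
    have := loop_eq k k.toNat hkk hK score [] []
      (by simp)
    simpa [solution, solution_alt] using this
  · subst hnil; rfl
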